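-- pv_equiv track=rewrite | github.com/youngstone007/cexian | planner.py | _build_sides_from_start_entry
-- ===== SOURCE A (Python) =====
-- from typing import List, Optional, Dict, Tuple
--
-- def opposite_side(side: str) -> str:
--     if side == "AB":
--         return "CD"
--     if side == "CD":
--         return "AB"
--     raise ValueError(f"Unknown side: {side}")
--
-- def _build_sides_from_start_entry(route_len: int, start_entry_side: str) -> List[str]:
--     """
--     给定路线长度和第一条线入口侧，生成每段换线的 from_side。
--     """
--     if route_len <= 1:
--         return []
--
--     sides = []
--     cur = opposite_side(start_entry_side)
--     for _ in range(route_len - 1):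
--         sides.append(cur)
--         cur = opposite_side(cur)
--     return sides
-- ===== SOURCE B (Python) =====
-- def opposite_side(side: str) -> str:
--     if side == "AB":
--         return "CD"
--     if side == "CD":
--         return "AB"
--     raise ValueError(f"Unknown side: {side}")
--
--
-- def _build_sides_from_start_entry(route_len: int, start_entry_side: str):
--     if route_len <= 1:
--         return []
--     pattern = [opposite_side(start_entry_side), start_entry_side]
--     return (pattern * (route_len // 2 + 1))[: route_len - 1]
-- ===== Notes on version B (the rewrite author's own statement) =====
-- stated objective: simpler
-- what changed: Replaces the per-element toggle loop (repeated opposite_side calls with running state) by building the two-element repeating unit once and producing the result by list replication and slicing.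
import Mathlib
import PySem

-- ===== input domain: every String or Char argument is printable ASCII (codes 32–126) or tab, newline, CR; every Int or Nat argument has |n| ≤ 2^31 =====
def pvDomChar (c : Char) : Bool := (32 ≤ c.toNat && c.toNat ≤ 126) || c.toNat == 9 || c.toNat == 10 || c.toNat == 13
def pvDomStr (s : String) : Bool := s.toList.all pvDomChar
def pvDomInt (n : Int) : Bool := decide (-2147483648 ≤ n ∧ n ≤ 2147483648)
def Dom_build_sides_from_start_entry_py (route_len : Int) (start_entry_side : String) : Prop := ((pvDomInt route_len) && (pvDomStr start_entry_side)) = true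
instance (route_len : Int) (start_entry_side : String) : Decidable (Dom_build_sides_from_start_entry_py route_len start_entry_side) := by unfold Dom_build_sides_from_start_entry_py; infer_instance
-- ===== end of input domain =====

-- B replaces A's per-element toggle loop by building the two-element repeating unit once and
-- producing the result by list replication and slicing (objective: simpler).


-- ===== PORT A =====
-- opposite_side: raises ValueError on anything but "AB"/"CD"; that case is excluded by Pre_
-- (the "" branch is never reached on admitted inputs).
def oppositeSide (side : String) : String :=
  if side = "AB" then "CD" else if side = "CD" then "AB" else ""

def build_sides_from_start_entry_py (route_len : Int) (start_entry_side : String) : List String :=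
  if route_len ≤ 1 then []
  else
    let r := (PySem.List.pyRange 0 (route_len - 1) 1).foldl
      (fun (st : List String × String) _ => (st.1 ++ [st.2], oppositeSide st.2))
      ([], oppositeSide start_entry_side)
    r.1

-- ===== PORT B =====
def build_sides_from_start_entry_py_alt (route_len : Int) (start_entry_side : String) : List String :=
  if route_len ≤ 1 then []
  else
    let pattern := [oppositeSide start_entry_side, start_entry_side]
    PySem.List.slice (List.flatten (List.replicate (PySem.Int.floordiv route_len 2 + 1).toNat pattern))
      none (some (route_len - 1))

-- ===== PRECONDITION & SPEC =====
-- Pre_ excludes exactly the inputs on which the Python raises ValueError: route_len > 1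
-- with a side other than "AB"/"CD" (both A and B raise there).
def Pre_build_sides_from_start_entry_py (route_len : Int) (start_entry_side : String) : Prop :=
  route_len ≤ 1 ∨ start_entry_side = "AB" ∨ start_entry_side = "CD"
instance (route_len : Int) (start_entry_side : String) : Decidable (Pre_build_sides_from_start_entry_py route_len start_entry_side) := by unfold Pre_build_sides_from_start_entry_py; infer_instance

def pvWitness_build_sides_from_start_entry_py : Int × String := (5, "AB")

def Spec_build_sides_from_start_entry_py (route_len : Int) (start_entry_side : String) (out : List String) : Prop := out = build_sides_from_start_entry_py_alt route_len start_entry_side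
instance (route_len : Int) (start_entry_side : String) (out : List String) : Decidable (Spec_build_sides_from_start_entry_py route_len start_entry_side out) := by unfold Spec_build_sides_from_start_entry_py; infer_instance

-- ===== CLAIM (what is proved, stated in full; the proofs are below) =====
def Claim_equal_build_sides_from_start_entry_py : Prop := ∀ (route_len : Int) (start_entry_side : String), Dom_build_sides_from_start_entry_py route_len start_entry_side → Pre_build_sides_from_start_entry_py route_len start_entry_side → Spec_build_sides_from_start_entry_py route_len start_entry_side (build_sides_from_start_entry_py route_len start_entry_side)

-- ===== LEMMAS AND PROOFS =====

/-- The alternating list a, b, a, b, … of length n. -/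
def altL (a b : String) : Nat → List String
  | 0 => []
  | n + 1 => a :: altL b a n

/-- A's toggle loop appends the alternating list. -/
theorem foldlA (l : List Int) (acc : List String) (a b : String)
    (hab : oppositeSide a = b) (hba : oppositeSide b = a) :
    l.foldl (fun (st : List String × String) _ => (st.1 ++ [st.2], oppositeSide st.2)) (acc, a)
      = (acc ++ altL a b l.length, if l.length % 2 = 0 then a else b) := by
  induction l generalizing acc a b with
  | nil => simp [altL]
  | cons x xs ih =>
    simp only [List.foldl_cons, hab]
    rw [ih (acc ++ [a]) b a hba hab, Prod.mk.injEq]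
    refine ⟨by simp [altL], ?_⟩
    rcases Nat.mod_two_eq_zero_or_one xs.length with h | h <;>
      simp [List.length_cons, Nat.add_mod, h]
/-- Taking n ≤ 2k elements of k copies of [a, b] is the alternating list. -/
theorem take_flatten_replicate (k : Nat) (a b : String) :
    ∀ n : Nat, n ≤ 2 * k →
      (List.flatten (List.replicate k [a, b])).take n = altL a b n := by
  induction k generalizing a b with
  | zero => intro n hn; interval_cases n; simp [altL]
  | succ k ih =>
    intro n hn
    match n with
    | 0 => simp [altL]
    | 1 => simp [List.replicate_succ, altL]
    | m + 2 =>
      simp only [List.replicate_succ, List.flatten_cons, List.cons_append, List.nil_append,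
        List.take_succ_cons, altL]
      rw [ih a b m (by omega)]

-- ===== VERDICT (by name: the statement is the Claim_ definition above) =====
theorem build_sides_from_start_entry_py_spec : Claim_equal_build_sides_from_start_entry_py := by
  intro route_len s _ hpre
  unfold Spec_build_sides_from_start_entry_py
  unfold build_sides_from_start_entry_py build_sides_from_start_entry_py_alt
  by_cases h1 : route_len ≤ 1
  · simp [h1]
  · simp only [h1, if_false]
    have hside : s = "AB" ∨ s = "CD" := by
      rcases hpre with h | h | h
      · omega
      · exact Or.inl h
      · exact Or.inr h
    have hab : oppositeSide (oppositeSide s) = s := by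
      rcases hside with h | h <;> simp [h, oppositeSide]
    rw [foldlA _ [] (oppositeSide s) s hab rfl]
    rw [PySem.List.slice_to _ (by omega)]
    rw [take_flatten_replicate _ _ _ _ (by
      have := PySem.Int.floordiv_eq_ediv_of_pos (a := route_len) (b := 2) (by omega)
      omega)]
    simp [PySem.List.length_pyRange_one]
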